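-- pv_equiv track=rewrite | github.com/jchinedu/Python | class_work/new_task.py | multiply_all_elements_at_every_third_positions
-- ===== SOURCE A (Python) =====
-- def multiply_all_elements_at_every_third_positions(numbers):
--     count = 1
--     index = 0
--     for number in numbers:
--         if (index+1) % 3 == 0:
--             count *= number
--         index += 1
--     return count
-- ===== SOURCE B (Python) =====
-- def multiply_all_elements_at_every_third_positions(numbers):
--     result = 1
--     i = 2
--     while i < len(numbers):
--         result *= numbers[i]
--         i += 3
--     return result
-- ===== Notes on version B (the rewrite author's own statement) =====
-- stated objective: simpler
-- what changed: Replaces the scan of every element with a (index+1)%3 test by a stride loop that jumps directly to indices 2,5,8,... and multiplies only those.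
import Mathlib
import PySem

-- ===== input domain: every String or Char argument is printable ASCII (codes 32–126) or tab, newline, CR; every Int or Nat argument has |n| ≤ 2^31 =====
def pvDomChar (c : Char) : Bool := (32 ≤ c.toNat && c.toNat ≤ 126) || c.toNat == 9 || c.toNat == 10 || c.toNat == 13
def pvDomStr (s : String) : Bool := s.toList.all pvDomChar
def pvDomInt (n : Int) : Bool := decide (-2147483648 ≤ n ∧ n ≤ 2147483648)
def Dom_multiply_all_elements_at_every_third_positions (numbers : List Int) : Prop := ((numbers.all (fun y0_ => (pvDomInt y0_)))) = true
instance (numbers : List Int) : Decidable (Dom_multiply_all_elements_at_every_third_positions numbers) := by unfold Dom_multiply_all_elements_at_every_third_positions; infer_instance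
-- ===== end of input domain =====

-- ===== PORT A =====
-- B replaces A's every-element scan with a (index+1)%3 test by a stride loop over indices 2,5,8,... (objective: simpler).
def multiply_all_elements_at_every_third_positions (numbers : List Int) : Int :=
  (numbers.foldl
    (fun (st : Int × Int) number =>
      (if PySem.Int.mod (st.2 + 1) 3 == 0 then st.1 * number else st.1, st.2 + 1))
    (1, 0)).1

-- ===== PORT B =====
def pvAltGo (numbers : List Int) (result : Int) (i : Nat) : Int :=
  if h : i < numbers.length then pvAltGo numbers (result * numbers[i]) (i + 3) else result
termination_by numbers.length - i

def multiply_all_elements_at_every_third_positions_alt (numbers : List Int) : Int :=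
  pvAltGo numbers 1 2

-- ===== PRECONDITION & SPEC =====
def Spec_multiply_all_elements_at_every_third_positions (numbers : List Int) (out : Int) : Prop := out = multiply_all_elements_at_every_third_positions_alt numbers
instance (numbers : List Int) (out : Int) : Decidable (Spec_multiply_all_elements_at_every_third_positions numbers out) := by unfold Spec_multiply_all_elements_at_every_third_positions; infer_instance

-- ===== CLAIM (what is proved, stated in full; the proofs are below) =====
def Claim_equal_multiply_all_elements_at_every_third_positions : Prop := ∀ (numbers : List Int), Dom_multiply_all_elements_at_every_third_positions numbers → Spec_multiply_all_elements_at_every_third_positions numbers (multiply_all_elements_at_every_third_positions numbers)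

-- ===== LEMMAS AND PROOFS =====

-- ===== VERDICT (by name: the statement is the Claim_ definition above) =====
-- product of elements at offsets 0, 3, 6, ... of a list
def pvStride : List Int → Int
  | [] => 1
  | x :: rest => x * pvStride (rest.drop 2)
termination_by l => l.length
decreasing_by simp [List.length_drop]

theorem pvStride_nil : pvStride [] = 1 := by rw [pvStride]
theorem pvStride_cons (x : Int) (rest : List Int) :
    pvStride (x :: rest) = x * pvStride (rest.drop 2) := by rw [pvStride]

theorem pvMod3 (j : Int) : PySem.Int.mod j 3 = j % 3 := by
  simp [PySem.Int.mod]
  have := Int.fmod_eq_emod (a := j) (b := 3)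
  simpa using this

theorem pvFoldA (xs : List Int) (c i : Int) (hm : i % 3 = 0) (hi : 0 ≤ i) :
    (xs.foldl
      (fun (st : Int × Int) number =>
        (if PySem.Int.mod (st.2 + 1) 3 == 0 then st.1 * number else st.1, st.2 + 1))
      (c, i)).1 = c * pvStride (xs.drop 2) := by
  match xs with
  | [] => simp [pvStride_nil]
  | [a] =>
    simp only [List.foldl, pvMod3, List.drop, pvStride_nil, beq_iff_eq]
    have h1 : ¬ (i + 1) % 3 = 0 := by omega
    simp [h1]
  | [a, b] =>
    simp only [List.foldl, pvMod3, List.drop, pvStride_nil, beq_iff_eq]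
    have h1 : ¬ (i + 1) % 3 = 0 := by omega
    have h2 : ¬ (i + 1 + 1) % 3 = 0 := by omega
    simp [h1, h2]
  | a :: b :: x :: rest =>
    have h1 : (((i + 1) % 3 : Int) == 0) = false := by simp; omega
    have h2 : (((i + 1 + 1) % 3 : Int) == 0) = false := by simp; omega
    have h3 : (((i + 1 + 1 + 1) % 3 : Int) == 0) = true := by simp; omega
    simp only [List.foldl, pvMod3, h1, h2, h3, Bool.false_eq_true, if_false, if_true]
    rw [show (fun (st : Int × Int) number =>
        (if ((st.2 + 1) % 3 == 0) = true then st.1 * number else st.1, st.2 + 1)) =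
      (fun (st : Int × Int) number =>
        (if PySem.Int.mod (st.2 + 1) 3 == 0 then st.1 * number else st.1, st.2 + 1)) from by
        funext st n; rw [pvMod3]]
    rw [pvFoldA rest (c * x) (i + 1 + 1 + 1) (by omega) (by omega)]
    simp only [List.drop, pvStride_cons]
    ring
termination_by xs.length

theorem pvAltGo_eq (numbers : List Int) (r : Int) (i : Nat) :
    pvAltGo numbers r i = r * pvStride (numbers.drop i) := by
  unfold pvAltGo
  split
  · next h =>
    rw [pvAltGo_eq numbers (r * numbers[i]) (i + 3)]
    rw [List.drop_eq_getElem_cons h, pvStride_cons, List.drop_drop]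
    have h3 : i + 1 + 2 = i + 3 := by omega
    rw [h3]; ring
  · next h =>
    rw [List.drop_eq_nil_of_le (by omega), pvStride_nil]; ring
termination_by numbers.length - i

-- ===== VERDICT =====
theorem multiply_all_elements_at_every_third_positions_spec : Claim_equal_multiply_all_elements_at_every_third_positions := by
  intro numbers _
  unfold Spec_multiply_all_elements_at_every_third_positions
  unfold multiply_all_elements_at_every_third_positions multiply_all_elements_at_every_third_positions_alt
  rw [pvFoldA numbers 1 0 (by decide) (by decide), pvAltGo_eq numbers 1 2]
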